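-- pv_equiv track=rewrite | github.com/namloga/dsa_labs_Se2 | Lab1/task5/src/main.py | Solve
-- ===== SOURCE A (Python) =====
-- def Solve(n):
--     result = []
--     sum_far = 0
--     current = 1
--
--     while sum_far + current <= n:
--         result.append(current)
--         sum_far += current
--         current += 1
--
--     result[-1] += (n - sum_far)
--
--     return len(result), result
-- ===== SOURCE B (Python) =====
-- def Solve(n):
--     # binary search for the largest k with k*(k+1)//2 <= n, then take 1..k
--     # and add the remainder to the last part
--     lo, hi = 1, n
--     while lo < hi:
--         mid = (lo + hi + 1) // 2
--         if mid * (mid + 1) // 2 <= n: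
--             lo = mid
--         else:
--             hi = mid - 1
--     result = list(range(1, lo + 1))
--     result[-1] += n - lo * (lo + 1) // 2
--     return len(result), result
-- ===== Notes on version B (the rewrite author's own statement) =====
-- stated objective: alternative
-- what changed: Replaces the incremental accumulate-and-append loop by a binary search for the largest k whose triangular number is at most n, followed by materializing the range in one step; Pre_ excludes nonpositive n, on which A raises IndexError (last-element update of the empty list) while B returns the one-part answer.
-- outside the precondition, e.g. on Solve(0): A raises IndexError, B returns (1, [0])
import Mathlib
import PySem

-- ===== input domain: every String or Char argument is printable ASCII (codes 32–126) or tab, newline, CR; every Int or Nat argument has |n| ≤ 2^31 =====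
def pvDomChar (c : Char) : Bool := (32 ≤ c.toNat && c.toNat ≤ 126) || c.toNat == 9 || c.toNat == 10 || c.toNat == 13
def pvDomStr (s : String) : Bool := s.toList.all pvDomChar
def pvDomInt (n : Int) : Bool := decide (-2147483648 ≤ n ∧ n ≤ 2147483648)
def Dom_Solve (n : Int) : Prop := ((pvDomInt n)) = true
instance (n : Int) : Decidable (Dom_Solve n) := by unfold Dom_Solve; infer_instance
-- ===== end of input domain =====

-- B replaces A's incremental accumulation loop by a binary search for the cut-off k (alternative algorithm, same return value).

-- ===== PORT A =====
-- the while loop; fuel only bounds the iteration count (n.toNat + 1 always suffices, proved below)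
def solveLoopA : Nat → Int → Int → Int → List Int → List Int × Int
  | 0, _, sum_far, _, result => (result, sum_far)
  | fuel + 1, n, sum_far, current, result =>
    if sum_far + current ≤ n then
      solveLoopA fuel n (sum_far + current) (current + 1) (result ++ [current])
    else (result, sum_far)

def Solve (n : Int) : Int × List Int :=
  let p := solveLoopA (n.toNat + 1) n 0 1 []
  -- result[-1] += (n - sum_far): IndexError on an empty result (n ≤ 0), excluded by Pre_
  let r2 := PySem.List.pySetD p.1 (-1) (PySem.List.pyGetD p.1 (-1) 0 + (n - p.2))
  ((r2.length : Int), r2)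

-- ===== PORT B =====
-- the while loop of Source B: binary search for the largest k with k*(k+1)//2 <= n;
-- fuel only bounds the iteration count ((hi-lo).toNat + 1 always suffices, proved below)
def bsearchB : Nat → Int → Int → Int → Int
  | 0, _, lo, _ => lo
  | fuel + 1, n, lo, hi =>
    if lo < hi then
      if PySem.Int.floordiv (PySem.Int.floordiv (lo + hi + 1) 2 * (PySem.Int.floordiv (lo + hi + 1) 2 + 1)) 2 ≤ n then
        bsearchB fuel n (PySem.Int.floordiv (lo + hi + 1) 2) hi
      else
        bsearchB fuel n lo (PySem.Int.floordiv (lo + hi + 1) 2 - 1)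
    else lo

def Solve_alt (n : Int) : Int × List Int :=
  let k := bsearchB ((n - 1).toNat + 1) n 1 n
  let result := PySem.List.pyRange 1 (k + 1) 1
  let r2 := PySem.List.pySetD result (-1) (PySem.List.pyGetD result (-1) 0 + (n - PySem.Int.floordiv (k * (k + 1)) 2))
  ((r2.length : Int), r2)

-- ===== PRECONDITION & SPEC =====
-- Pre_ excludes n ≤ 0, on which A raises IndexError (result[-1] on the empty list)
def Pre_Solve (n : Int) : Prop := 1 ≤ n
instance (n : Int) : Decidable (Pre_Solve n) := by unfold Pre_Solve; infer_instance
def pvWitness_Solve : Int := 3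

def Spec_Solve (n : Int) (out : Int × List Int) : Prop := out = Solve_alt n
instance (n : Int) (out : Int × List Int) : Decidable (Spec_Solve n out) := by unfold Spec_Solve; infer_instance

-- ===== CLAIM (what is proved, stated in full; the proofs are below) =====
def Claim_equal_Solve : Prop := ∀ (n : Int), Dom_Solve n → Pre_Solve n → Spec_Solve n (Solve n)

-- ===== LEMMAS AND PROOFS =====

-- floor division by 2 of an even number
lemma floordiv_two_double (m : Int) : PySem.Int.floordiv (m + m) 2 = m := by
  have hd := PySem.Int.floordiv_mul_add_mod (m + m) 2
  have h0 := PySem.Int.mod_nonneg (a := m + m) (b := 2) (by omega)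
  have h1 := PySem.Int.mod_lt (a := m + m) (b := 2) (by omega)
  omega

lemma bsearchB_spec (n : Int) : ∀ (fuel : Nat) (lo hi : Int), (hi - lo).toNat < fuel →
    1 ≤ lo → lo ≤ hi → lo * (lo + 1) ≤ 2 * n → 2 * n < (hi + 1) * (hi + 2) →
    lo ≤ bsearchB fuel n lo hi ∧ bsearchB fuel n lo hi ≤ hi ∧
      bsearchB fuel n lo hi * (bsearchB fuel n lo hi + 1) ≤ 2 * n ∧
      2 * n < (bsearchB fuel n lo hi + 1) * (bsearchB fuel n lo hi + 2) := by
  intro fuel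
  induction fuel with
  | zero => intro lo hi hN; omega
  | succ fuel IH =>
    intro lo hi hN hlo hle h1 h2
    rw [bsearchB]
    split
    · rename_i hlt
      have hb := PySem.Int.floordiv_two_mid_bounds (show lo + 1 ≤ hi by omega)
      have e : lo + 1 + hi = lo + hi + 1 := by ring
      rw [e] at hb
      set m := PySem.Int.floordiv (lo + hi + 1) 2 with hm
      obtain ⟨r, hr⟩ := Int.even_mul_succ_self m
      have hfd : PySem.Int.floordiv (m * (m + 1)) 2 = r := by rw [hr, floordiv_two_double]
      split
      · rename_i hg
        have hg' : m * (m + 1) ≤ 2 * n := by rw [hr]; omega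
        have := IH m hi (by omega) (by omega) (by omega) hg' h2
        exact ⟨by omega, this.2.1, this.2.2⟩
      · rename_i hg
        have hg' : 2 * n < m * (m + 1) := by rw [hr]; omega
        have hexp : (m - 1 + 1) * (m - 1 + 2) = m * (m + 1) := by ring
        have := IH lo (m - 1) (by omega) hlo (by omega) h1 (by omega)
        exact ⟨this.1, by omega, this.2.2.1, this.2.2.2⟩
    · rename_i hlt
      have heq : lo = hi := by omega
      subst heq
      exact ⟨le_refl _, le_refl _, h1, h2⟩

lemma solveLoopA_spec (n k : Int) (hk : k * (k + 1) ≤ 2 * n) (hk2 : 2 * n < (k + 1) * (k + 2)) :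
    ∀ (fuel : Nat) (s c : Int) (res : List Int), 1 ≤ c → (n - s).toNat < fuel →
    2 * s = c * (c - 1) → s ≤ n → c - 1 ≤ k →
    ∃ sf, solveLoopA fuel n s c res = (res ++ PySem.List.pyRange c (k + 1) 1, sf) ∧ 2 * sf = k * (k + 1) := by
  intro fuel
  induction fuel with
  | zero => intro s c res hc hN; omega
  | succ fuel IH =>
    intro s c res hc hN hs hsn hck
    rw [solveLoopA]
    split
    · rename_i h
      have hck' : c ≤ k := by
        rcases lt_or_eq_of_le hck with h' | h'
        · omega
        · exfalso; nlinarith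
      obtain ⟨sf, hrec, hsf⟩ :=
        IH (s + c) (c + 1) (res ++ [c]) (by omega) (by omega)
          (by linear_combination hs) (by omega) (by omega)
      refine ⟨sf, ?_, hsf⟩
      rw [hrec, PySem.List.pyRange_one_cons (by omega : c < k + 1)]
      simp
    · rename_i h
      have hkc : k = c - 1 := by
        by_contra hne
        have hck2 : c ≤ k := by omega
        have hmono : 0 ≤ (k - c) * (k + c + 1) :=
          mul_nonneg (by omega) (by omega)
        nlinarith
      refine ⟨s, ?_, by nlinarith⟩
      rw [PySem.List.pyRange_one_eq_nil (by omega : k + 1 ≤ c)]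
      simp

-- ===== VERDICT (by name: the statement is the Claim_ definition above) =====
theorem Solve_spec : Claim_equal_Solve := by
  unfold Claim_equal_Solve Spec_Solve
  intro n _ hpre
  have hpre' : 1 ≤ n := hpre
  have hb := bsearchB_spec n ((n - 1).toNat + 1) 1 n (by omega) (le_refl 1) hpre' (by nlinarith) (by nlinarith)
  obtain ⟨hk1, hk2, hk3, hk4⟩ := hb
  obtain ⟨sf, hloop, hsf⟩ :=
    solveLoopA_spec n (bsearchB ((n - 1).toNat + 1) n 1 n) hk3 hk4 (n.toNat + 1) 0 1 [] (by omega) (by omega) (by ring) (by omega) (by omega)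
  have hfd : PySem.Int.floordiv (bsearchB ((n - 1).toNat + 1) n 1 n * (bsearchB ((n - 1).toNat + 1) n 1 n + 1)) 2 = sf := by
    obtain ⟨r, hr⟩ := Int.even_mul_succ_self (bsearchB ((n - 1).toNat + 1) n 1 n)
    rw [hr, floordiv_two_double]; omega
  simp only [Solve, Solve_alt]
  rw [hloop, hfd]
  simp
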